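-- pv_equiv track=rewrite | github.com/Thomas05000005/CineSort | cinesort/domain/genre_rules.py | detect_primary_genre
-- ===== SOURCE A (Python) =====
-- from typing import Any, Dict, List, Optional, Tuple
--
-- _GENRE_CANONICAL: Dict[str, str] = {
--     "animation": "animation",
--     "action": "action",
--     "thriller": "thriller",
--     "horror": "horror",
--     "documentary": "documentary",
--     "comedy": "comedy",
--     "drama": "drama",
--     # Alias FR fréquents
--     "animation ": "animation",
--     "épouvante-horreur": "horror",
--     "horreur": "horror",
--     "documentaire": "documentary",
--     "comédie": "comedy",
--     "drame": "drama",
--     "policier": "thriller",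
-- }
--
-- def canonical_genre(genre: str) -> Optional[str]:
--     """Retourne la clé canonique d'un genre TMDb, ou None si inconnu."""
--     if not genre:
--         return None
--     key = str(genre).strip().lower()
--     return _GENRE_CANONICAL.get(key)
--
-- def detect_primary_genre(tmdb_genres: Optional[List[str]]) -> Optional[str]:
--     """Détecte le genre primaire depuis la liste TMDb.
--
--     Stratégie : priorité aux genres les plus "différenciants" pour le scoring.
--     Si plusieurs genres matchent, on préfère dans cet ordre :
--     animation > horror > action > thriller > documentary > drama > comedy.
--     """
--     if not tmdb_genres:
--         return None
--     priority = ["animation", "horror", "action", "thriller", "documentary", "drama", "comedy"]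
--     canonical = {canonical_genre(g) for g in tmdb_genres if g}
--     canonical.discard(None)
--     for p in priority:
--         if p in canonical:
--             return p
--     return None
-- ===== SOURCE B (Python) =====
-- from typing import Dict, List, Optional
--
-- _GENRE_CANONICAL: Dict[str, str] = {
--     "animation": "animation",
--     "action": "action",
--     "thriller": "thriller",
--     "horror": "horror",
--     "documentary": "documentary",
--     "comedy": "comedy",
--     "drama": "drama",
--     # Alias FR fréquents
--     "animation ": "animation",
--     "épouvante-horreur": "horror",
--     "horreur": "horror",
--     "documentaire": "documentary",
--     "comédie": "comedy",
--     "drame": "drama",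
--     "policier": "thriller",
-- }
--
-- _PRIORITY: List[str] = ["animation", "horror", "action", "thriller", "documentary", "drama", "comedy"]
-- # alias -> rank of its canonical genre in the priority order, precomputed once
-- _RANK: Dict[str, int] = {alias: _PRIORITY.index(canon) for alias, canon in _GENRE_CANONICAL.items()}
--
-- def detect_primary_genre(tmdb_genres: Optional[List[str]]) -> Optional[str]:
--     """Single pass keeping the smallest priority rank seen; no intermediate set."""
--     if not tmdb_genres:
--         return None
--     best = None
--     for g in tmdb_genres:
--         r = _RANK.get(str(g).strip().lower())
--         if r is not None and (best is None or r < best):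
--             best = r
--     return _PRIORITY[best] if best is not None else None
-- ===== Notes on version B (the rewrite author's own statement) =====
-- stated objective: alternative
-- what changed: B precomputes an alias-to-priority-rank dict once and makes a single pass keeping the smallest rank seen, instead of A's two phases of building a set of canonical genres and then scanning the priority list.
import Mathlib
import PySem

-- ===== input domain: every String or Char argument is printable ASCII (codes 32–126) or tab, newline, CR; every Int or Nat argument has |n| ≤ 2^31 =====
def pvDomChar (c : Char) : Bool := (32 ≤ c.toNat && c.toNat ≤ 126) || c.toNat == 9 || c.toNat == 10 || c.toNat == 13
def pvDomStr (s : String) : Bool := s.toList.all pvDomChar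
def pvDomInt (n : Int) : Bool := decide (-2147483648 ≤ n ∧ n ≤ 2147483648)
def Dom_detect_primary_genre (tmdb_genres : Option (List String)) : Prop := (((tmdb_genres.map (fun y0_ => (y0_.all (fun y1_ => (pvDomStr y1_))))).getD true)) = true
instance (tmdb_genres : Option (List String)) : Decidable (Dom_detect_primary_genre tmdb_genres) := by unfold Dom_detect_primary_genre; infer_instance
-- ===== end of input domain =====

-- B replaces A's build-set-then-scan-priority two phases by a single pass that keeps the
-- smallest precomputed priority rank seen (alternative decomposition, same cost).


-- ===== PORT A =====
def pvGenreCanonical : PySem.Dict String String := PySem.Dict.ofList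
  [("animation", "animation"), ("action", "action"), ("thriller", "thriller"),
   ("horror", "horror"), ("documentary", "documentary"), ("comedy", "comedy"),
   ("drama", "drama"), ("animation ", "animation"), ("épouvante-horreur", "horror"),
   ("horreur", "horror"), ("documentaire", "documentary"), ("comédie", "comedy"),
   ("drame", "drama"), ("policier", "thriller")]

def canonical_genre (genre : String) : Option String :=
  if genre = "" then none
  else PySem.Dict.get? pvGenreCanonical (PySem.Str.lower (PySem.Str.strip genre))

-- 'for p in priority: if p in canonical: return p' / 'return None'
def pvScan (canon : PySem.Set (Option String)) : List String → Option String
  | [] => none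
  | p :: ps => if PySem.Set.contains canon (some p) then some p else pvScan canon ps

def detect_primary_genre (tmdb_genres : Option (List String)) : Option String :=
  match tmdb_genres with
  | none => none
  | some l =>
    if l = [] then none
    else
      let priority := ["animation", "horror", "action", "thriller", "documentary", "drama", "comedy"]
      let canonical : PySem.Set (Option String) :=
        PySem.Set.ofList ((l.filter (fun g => g ≠ "")).map canonical_genre)
      let canonical := PySem.Set.discard canonical none
      pvScan canonical priority

-- ===== PORT B =====
def pvGenreCanonicalB : List (String × String) :=
  [("animation", "animation"), ("action", "action"), ("thriller", "thriller"),
   ("horror", "horror"), ("documentary", "documentary"), ("comedy", "comedy"),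
   ("drama", "drama"), ("animation ", "animation"), ("épouvante-horreur", "horror"),
   ("horreur", "horror"), ("documentaire", "documentary"), ("comédie", "comedy"),
   ("drame", "drama"), ("policier", "thriller")]

def pvPriority : List String :=
  ["animation", "horror", "action", "thriller", "documentary", "drama", "comedy"]

-- _RANK = {alias: _PRIORITY.index(canon) …}; .index never raises: every canonical name is in _PRIORITY
def pvRank : PySem.Dict String Int :=
  PySem.Dict.ofList (pvGenreCanonicalB.map
    (fun p => (p.1, ((PySem.List.index? pvPriority p.2).getD 0 : Nat))))

def detect_primary_genre_alt (tmdb_genres : Option (List String)) : Option String :=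
  match tmdb_genres with
  | none => none
  | some l =>
    if l = [] then none
    else
      let best : Option Int := l.foldl (fun best g =>
        match PySem.Dict.get? pvRank (PySem.Str.lower (PySem.Str.strip g)) with
        | none => best
        | some r =>
          match best with
          | none => some r
          | some b => if r < b then some r else some b) none
      match best with
      | none => none
      | some b => PySem.List.pyGet? pvPriority b   -- b ∈ [0,6]: never raises

-- ===== PRECONDITION & SPEC =====
def Spec_detect_primary_genre (tmdb_genres : Option (List String)) (out : Option String) : Prop := out = detect_primary_genre_alt tmdb_genres
instance (tmdb_genres : Option (List String)) (out : Option String) : Decidable (Spec_detect_primary_genre tmdb_genres out) := by unfold Spec_detect_primary_genre; infer_instance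

-- ===== CLAIM (what is proved, stated in full; the proofs are below) =====
def Claim_equal_detect_primary_genre : Prop := ∀ (tmdb_genres : Option (List String)), Dom_detect_primary_genre tmdb_genres → Spec_detect_primary_genre tmdb_genres (detect_primary_genre tmdb_genres)

-- ===== LEMMAS AND PROOFS =====
def pvIdx (c : String) : Int := ((PySem.List.index? pvPriority c).getD 0 : Nat)

def pvB (l : List String) (p : String) : Bool := l.any (fun g => canonical_genre g == some p)

def pvF (b0 b1 b2 b3 b4 b5 b6 : Bool) : Option Int :=
  if b0 then some 0 else if b1 then some 1 else if b2 then some 2 else if b3 then some 3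
  else if b4 then some 4 else if b5 then some 5 else if b6 then some 6 else none

def pvG (b0 b1 b2 b3 b4 b5 b6 : Bool) : Option String :=
  if b0 then some "animation" else if b1 then some "horror" else if b2 then some "action"
  else if b3 then some "thriller" else if b4 then some "documentary" else if b5 then some "drama"
  else if b6 then some "comedy" else none

def pvOMin : Option Int → Option Int → Option Int
  | none, y => y
  | some a, none => some a
  | some b, some r => some (if r < b then r else b)

def pvStep (best : Option Int) (g : String) : Option Int :=
  match PySem.Dict.get? pvRank (PySem.Str.lower (PySem.Str.strip g)) with
  | none => best
  | some r =>
    match best with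
    | none => some r
    | some b => if r < b then some r else some b

theorem pv_canon_eq (g : String) :
    canonical_genre g = PySem.Dict.get? pvGenreCanonical (PySem.Str.lower (PySem.Str.strip g)) := by
  unfold canonical_genre
  split
  · subst g; decide
  · rfl

theorem pv_rank_get (k : String) :
    PySem.Dict.get? pvRank k = (PySem.Dict.get? pvGenreCanonical k).map pvIdx := by
  simp [PySem.Dict.get?,
    show PySem.Dict.items pvRank = pvGenreCanonicalB.map (fun p => (p.1, pvIdx p.2)) from by decide,
    show PySem.Dict.items pvGenreCanonical = pvGenreCanonicalB from by decide,
    List.find?_map, Option.map_map]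
  rfl

theorem pv_canon_val (k c : String) (h : PySem.Dict.get? pvGenreCanonical k = some c) :
    c ∈ pvPriority := by
  rcases hf : List.find? (fun p => p.1 == k) (PySem.Dict.items pvGenreCanonical) with _ | pr
  · simp [PySem.Dict.get?, hf] at h
  · have hm := List.mem_of_find?_eq_some hf
    have hall : ∀ p ∈ PySem.Dict.items pvGenreCanonical, p.2 ∈ pvPriority := by decide
    have h2 : pr.2 = c := by simpa [PySem.Dict.get?, hf] using h
    exact h2 ▸ hall _ hm

theorem pv_step_eq (b : Option Int) (g : String) :
    pvStep b g = pvOMin b (PySem.Dict.get? pvRank (PySem.Str.lower (PySem.Str.strip g))) := by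
  unfold pvStep pvOMin
  rcases PySem.Dict.get? pvRank (PySem.Str.lower (PySem.Str.strip g)) with _ | r <;>
    rcases b with _ | bb <;> simp <;> split_ifs <;> simp
theorem pv_omin_assoc (a b c : Option Int) :
    pvOMin (pvOMin a b) c = pvOMin a (pvOMin b c) := by
  rcases a with _ | a <;> rcases b with _ | b <;> rcases c with _ | c <;>
    simp [pvOMin] <;> split_ifs <;> first | rfl | omega

theorem pv_foldl_omin (l : List String) (b : Option Int) :
    l.foldl pvStep b = pvOMin b (l.foldl pvStep none) := by
  induction l generalizing b with
  | nil => cases b <;> rfl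
  | cons g t ih =>
    simp only [List.foldl_cons]
    rw [ih (pvStep b g), ih (pvStep none g), pv_step_eq b g, pv_step_eq none g, pv_omin_assoc]
    rfl

theorem pv_rank_canon (g : String) :
    PySem.Dict.get? pvRank (PySem.Str.lower (PySem.Str.strip g)) = (canonical_genre g).map pvIdx := by
  rw [pv_rank_get, pv_canon_eq]

theorem pvF0 : ∀ b0 b1 b2 b3 b4 b5 b6 : Bool, pvOMin (some 0) (pvF b0 b1 b2 b3 b4 b5 b6) = pvF true b1 b2 b3 b4 b5 b6 := by decide
theorem pvF1 : ∀ b0 b1 b2 b3 b4 b5 b6 : Bool, pvOMin (some 1) (pvF b0 b1 b2 b3 b4 b5 b6) = pvF b0 true b2 b3 b4 b5 b6 := by decide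
theorem pvF2 : ∀ b0 b1 b2 b3 b4 b5 b6 : Bool, pvOMin (some 2) (pvF b0 b1 b2 b3 b4 b5 b6) = pvF b0 b1 true b3 b4 b5 b6 := by decide
theorem pvF3 : ∀ b0 b1 b2 b3 b4 b5 b6 : Bool, pvOMin (some 3) (pvF b0 b1 b2 b3 b4 b5 b6) = pvF b0 b1 b2 true b4 b5 b6 := by decide
theorem pvF4 : ∀ b0 b1 b2 b3 b4 b5 b6 : Bool, pvOMin (some 4) (pvF b0 b1 b2 b3 b4 b5 b6) = pvF b0 b1 b2 b3 true b5 b6 := by decide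
theorem pvF5 : ∀ b0 b1 b2 b3 b4 b5 b6 : Bool, pvOMin (some 5) (pvF b0 b1 b2 b3 b4 b5 b6) = pvF b0 b1 b2 b3 b4 true b6 := by decide
theorem pvF6 : ∀ b0 b1 b2 b3 b4 b5 b6 : Bool, pvOMin (some 6) (pvF b0 b1 b2 b3 b4 b5 b6) = pvF b0 b1 b2 b3 b4 b5 true := by decide

theorem pv_fold_char (l : List String) :
    l.foldl pvStep none = pvF (pvB l "animation") (pvB l "horror") (pvB l "action")
      (pvB l "thriller") (pvB l "documentary") (pvB l "drama") (pvB l "comedy") := by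
  induction l with
  | nil => rfl
  | cons g t ih =>
    have hB : ∀ p, pvB (g :: t) p = ((canonical_genre g == some p) || pvB t p) := by
      intro p; simp [pvB]
    simp only [List.foldl_cons]
    rw [pv_foldl_omin, pv_step_eq none g, pv_rank_canon, ih]
    rcases hc : canonical_genre g with _ | c
    · simp [hB, pvOMin, hc]
    · have hmem : c ∈ pvPriority := pv_canon_val _ _ (by rw [← pv_canon_eq]; exact hc)
      have : pvOMin none ((some c).map pvIdx) = some (pvIdx c) := rfl
      rw [this]
      simp only [pvPriority, List.mem_cons] at hmem
      rcases hmem with rfl | rfl | rfl | rfl | rfl | rfl | rfl | h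
      · simp only [hB]; rw [show pvIdx "animation" = 0 from rfl, pvF0]; simp [hc]
      · simp only [hB]; rw [show pvIdx "horror" = 1 from rfl, pvF1]; simp [hc]
      · simp only [hB]; rw [show pvIdx "action" = 2 from rfl, pvF2]; simp [hc]
      · simp only [hB]; rw [show pvIdx "thriller" = 3 from rfl, pvF3]; simp [hc]
      · simp only [hB]; rw [show pvIdx "documentary" = 4 from rfl, pvF4]; simp [hc]
      · simp only [hB]; rw [show pvIdx "drama" = 5 from rfl, pvF5]; simp [hc]
      · simp only [hB]; rw [show pvIdx "comedy" = 6 from rfl, pvF6]; simp [hc]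
      · cases h
theorem pv_contains_eq (l : List String) (p : String) :
    PySem.Set.contains (PySem.Set.discard
      (PySem.Set.ofList ((l.filter (fun g => g ≠ "")).map canonical_genre)) none) (some p)
      = pvB l p := by
  rw [Bool.eq_iff_iff, PySem.Set.contains_iff, PySem.Set.mem_discard, PySem.Set.mem_ofList]
  simp only [List.mem_map, List.mem_filter, pvB, List.any_eq_true, beq_iff_eq]
  constructor
  · rintro ⟨⟨g, ⟨hg, _⟩, hcg⟩, _⟩
    exact ⟨g, hg, hcg⟩
  · rintro ⟨g, hg, hcg⟩
    have hge : g ≠ "" := by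
      intro h; rw [h] at hcg; cases hcg
    exact ⟨⟨g, ⟨hg, by simpa using hge⟩, hcg⟩, by simp⟩

theorem pv_glue : ∀ b0 b1 b2 b3 b4 b5 b6 : Bool,
    (match pvF b0 b1 b2 b3 b4 b5 b6 with
     | none => none
     | some b => PySem.List.pyGet? pvPriority b) = pvG b0 b1 b2 b3 b4 b5 b6 := by decide

theorem pv_A_char (l : List String) (hl : ¬ l = []) :
    detect_primary_genre (some l) = pvG (pvB l "animation") (pvB l "horror") (pvB l "action")
      (pvB l "thriller") (pvB l "documentary") (pvB l "drama") (pvB l "comedy") := by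
  unfold detect_primary_genre
  simp only [if_neg hl, pvScan, pv_contains_eq, pvG]

theorem pv_B_char (l : List String) (hl : ¬ l = []) :
    detect_primary_genre_alt (some l) = pvG (pvB l "animation") (pvB l "horror") (pvB l "action")
      (pvB l "thriller") (pvB l "documentary") (pvB l "drama") (pvB l "comedy") := by
  unfold detect_primary_genre_alt
  simp only [if_neg hl]
  have hstep : (fun (best : Option Int) (g : String) =>
      match PySem.Dict.get? pvRank (PySem.Str.lower (PySem.Str.strip g)) with
      | none => best
      | some r =>
        match best with
        | none => some r
        | some b => if r < b then some r else some b) = pvStep := by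
    funext best g
    rcases h : PySem.Dict.get? pvRank (PySem.Str.lower (PySem.Str.strip g)) with _ | r <;>
      simp [pvStep, h]
  rw [hstep, pv_fold_char, pv_glue]


-- ===== VERDICT (by name: the statement is the Claim_ definition above) =====
theorem detect_primary_genre_spec : Claim_equal_detect_primary_genre := by
  unfold Claim_equal_detect_primary_genre Spec_detect_primary_genre
  rintro (_ | l) _
  · rfl
  · by_cases hl : l = []
    · subst hl; rfl
    · rw [pv_A_char l hl, pv_B_char l hl]
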